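-- pv_equiv track=rewrite | github.com/rob634/rmhgeoapi | services/zarr/handler_generate_pyramid.py | _auto_detect_levels
-- ===== SOURCE A (Python) =====
-- def _auto_detect_levels(dimensions, lat_dim, lon_dim, chunk_size=256):
--     """Compute pyramid levels until coarsest fits in one chunk."""
--     max_spatial = max(dimensions.get(lat_dim, 1), dimensions.get(lon_dim, 1))
--     if max_spatial <= chunk_size:
--         return 1
--     levels = 0
--     size = max_spatial
--     while size > chunk_size:
--         size //= 2
--         levels += 1
--     return max(levels, 1)
-- ===== SOURCE B (Python) =====
-- def _auto_detect_levels(dimensions, lat_dim, lon_dim, chunk_size=256):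
--     """Compute pyramid levels until coarsest fits in one chunk (closed form)."""
--     max_spatial = max(dimensions.get(lat_dim, 1), dimensions.get(lon_dim, 1))
--     if max_spatial <= chunk_size:
--         return 1
--     # smallest k with max_spatial >> k <= chunk_size, via bit_length
--     return (max_spatial // (chunk_size + 1)).bit_length()
-- ===== Notes on version B (the rewrite author's own statement) =====
-- stated objective: idiomatic
-- what changed: Replaces the repeated-halving while loop by a closed form: the level count equals (max_spatial // (chunk_size + 1)).bit_length(), computed in O(1) integer operations.
import Mathlib
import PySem

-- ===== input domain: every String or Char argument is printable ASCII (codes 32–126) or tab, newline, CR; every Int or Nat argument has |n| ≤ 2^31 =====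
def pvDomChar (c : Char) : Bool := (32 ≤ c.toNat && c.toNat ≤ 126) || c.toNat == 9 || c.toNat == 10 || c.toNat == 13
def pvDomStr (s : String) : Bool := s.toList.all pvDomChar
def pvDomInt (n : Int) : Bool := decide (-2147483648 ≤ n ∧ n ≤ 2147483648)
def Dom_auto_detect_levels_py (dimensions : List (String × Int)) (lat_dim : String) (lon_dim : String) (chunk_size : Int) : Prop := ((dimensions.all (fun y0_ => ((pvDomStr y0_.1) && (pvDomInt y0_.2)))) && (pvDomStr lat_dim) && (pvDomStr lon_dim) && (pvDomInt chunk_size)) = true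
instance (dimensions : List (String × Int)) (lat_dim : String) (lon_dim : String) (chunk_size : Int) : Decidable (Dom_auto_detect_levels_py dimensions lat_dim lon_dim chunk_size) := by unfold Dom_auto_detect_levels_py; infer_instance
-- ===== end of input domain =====

-- B replaces A's halving loop by the closed form (max_spatial // (chunk_size+1)).bit_length(); return value only, no side effects.

-- ===== PORT A =====
-- the while loop of A; the extra '0 < size' guard only makes the recursion total
-- (inside Pre_ the loop is only entered with 0 < size, so it is the same computation)
def adLoop (chunk_size size levels : Int) : Int :=
  if 0 < size ∧ chunk_size < size then
    adLoop chunk_size (PySem.Int.floordiv size 2) (levels + 1)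
  else levels
termination_by size.toNat
decreasing_by
  rename_i h
  rw [PySem.Int.floordiv_eq_ediv_of_pos (by omega)]
  omega

def auto_detect_levels_py (dimensions : List (String × Int)) (lat_dim : String) (lon_dim : String) (chunk_size : Int) : Int :=
  let d := PySem.Dict.ofList dimensions
  let max_spatial := max (d.getD lat_dim 1) (d.getD lon_dim 1)
  if max_spatial ≤ chunk_size then 1
  else max (adLoop chunk_size max_spatial 0) 1

-- ===== PORT B =====
def auto_detect_levels_py_alt (dimensions : List (String × Int)) (lat_dim : String) (lon_dim : String) (chunk_size : Int) : Int :=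
  let d := PySem.Dict.ofList dimensions
  let max_spatial := max (d.getD lat_dim 1) (d.getD lon_dim 1)
  if max_spatial ≤ chunk_size then 1
  else (PySem.Int.bitLength (PySem.Int.floordiv max_spatial (chunk_size + 1)) : Int)

-- ===== PRECONDITION & SPEC =====
-- Pre_ excludes only inputs where A's while loop never terminates: chunk_size < 0 while
-- max_spatial > chunk_size (halving then stalls at 0 or -1 above chunk_size); A returns on everything admitted.
def Pre_auto_detect_levels_py (dimensions : List (String × Int)) (lat_dim : String) (lon_dim : String) (chunk_size : Int) : Prop :=
  0 ≤ chunk_size ∨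
    max ((PySem.Dict.ofList dimensions).getD lat_dim 1) ((PySem.Dict.ofList dimensions).getD lon_dim 1) ≤ chunk_size
instance (dimensions : List (String × Int)) (lat_dim : String) (lon_dim : String) (chunk_size : Int) : Decidable (Pre_auto_detect_levels_py dimensions lat_dim lon_dim chunk_size) := by unfold Pre_auto_detect_levels_py; infer_instance

def pvWitness_auto_detect_levels_py : (List (String × Int)) × String × String × Int :=
  ([("lat", 1000), ("lon", 500)], "lat", "lon", 256)

def Spec_auto_detect_levels_py (dimensions : List (String × Int)) (lat_dim : String) (lon_dim : String) (chunk_size : Int) (out : Int) : Prop := out = auto_detect_levels_py_alt dimensions lat_dim lon_dim chunk_size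
instance (dimensions : List (String × Int)) (lat_dim : String) (lon_dim : String) (chunk_size : Int) (out : Int) : Decidable (Spec_auto_detect_levels_py dimensions lat_dim lon_dim chunk_size out) := by unfold Spec_auto_detect_levels_py; infer_instance

-- ===== CLAIM (what is proved, stated in full; the proofs are below) =====
def Claim_equal_auto_detect_levels_py : Prop := ∀ (dimensions : List (String × Int)) (lat_dim : String) (lon_dim : String) (chunk_size : Int), Dom_auto_detect_levels_py dimensions lat_dim lon_dim chunk_size → Pre_auto_detect_levels_py dimensions lat_dim lon_dim chunk_size → Spec_auto_detect_levels_py dimensions lat_dim lon_dim chunk_size (auto_detect_levels_py dimensions lat_dim lon_dim chunk_size)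

-- ===== LEMMAS AND PROOFS =====

-- loop characterisation: for 0 ≤ cs < m the loop adds exactly bitLength (m // (cs+1))
lemma adLoop_eq (cs : Int) (hcs : 0 ≤ cs) (m l : Int) (h : cs < m) :
    adLoop cs m l = l + (PySem.Int.bitLength (PySem.Int.floordiv m (cs + 1)) : Int) := by
  have hm1 : 0 < m := by omega
  have hq : 1 ≤ PySem.Int.floordiv m (cs + 1) := by
    rw [PySem.Int.le_floordiv_iff_mul_le (by omega)]; omega
  rw [adLoop]
  rw [if_pos (⟨hm1, h⟩ : 0 < m ∧ cs < m)]
  have h2 : PySem.Int.floordiv m 2 = m / 2 := PySem.Int.floordiv_eq_ediv_of_pos (by omega)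
  by_cases hc : cs < m / 2
  · have hlt : m / 2 < m := by omega
    rw [h2, adLoop_eq cs hcs (m / 2) (l + 1) hc]
    rw [PySem.Int.bitLength_of_pos (n := PySem.Int.floordiv m (cs + 1)) (by omega)]
    have hcomm : PySem.Int.floordiv (PySem.Int.floordiv m (cs + 1)) 2
        = PySem.Int.floordiv (m / 2) (cs + 1) := by
      rw [PySem.Int.floordiv_eq_ediv_of_pos (a := m) (by omega),
          PySem.Int.floordiv_eq_ediv_of_pos (by omega),
          PySem.Int.floordiv_eq_ediv_of_pos (by omega),
          Int.ediv_ediv_of_nonneg (by omega),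
          Int.ediv_ediv_of_nonneg (by omega),
          mul_comm]
    rw [← hcomm]
    push_cast
    ring
  · -- after one halving the loop stops; the quotient is exactly 1
    have hstop : adLoop cs (PySem.Int.floordiv m 2) (l + 1) = l + 1 := by
      rw [adLoop, if_neg]
      rw [h2]; omega
    rw [hstop]
    have hq1 : PySem.Int.floordiv m (cs + 1) = 1 := by
      rw [PySem.Int.floordiv_eq_iff_of_pos (by omega)]
      omega
    have hb1 : PySem.Int.bitLength 1 = 1 := by decide
    rw [hq1, hb1]
    omega
termination_by m.toNat
decreasing_by omega

-- ===== VERDICT (by name: the statement is the Claim_ definition above) =====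
theorem auto_detect_levels_py_spec : Claim_equal_auto_detect_levels_py := by
  intro dims lat lon cs _ hpre
  unfold Spec_auto_detect_levels_py auto_detect_levels_py auto_detect_levels_py_alt
  set m := max ((PySem.Dict.ofList dims).getD lat 1) ((PySem.Dict.ofList dims).getD lon 1) with hm
  by_cases hle : m ≤ cs
  · rw [if_pos hle, if_pos hle]
  · have hcs : 0 ≤ cs := by
      cases hpre with
      | inl h => exact h
      | inr h => rw [← hm] at h; omega
    rw [if_neg hle, if_neg hle]
    rw [adLoop_eq cs hcs m 0 (by omega)]
    have hq : 1 ≤ PySem.Int.floordiv m (cs + 1) := by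
      rw [PySem.Int.le_floordiv_iff_mul_le (by omega)]; omega
    have hb : 1 ≤ (PySem.Int.bitLength (PySem.Int.floordiv m (cs + 1)) : Int) := by
      rw [PySem.Int.bitLength_of_pos (by omega)]; push_cast; omega
    simp only [← hm]
    omega
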